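-- pv_equiv track=rewrite | github.com/ai-driven-developer/py-holdem-solver | poker_solver_ui/strategy_viewer.py | _split_history
-- ===== SOURCE A (Python) =====
-- def _split_history(history: str) -> list[str]:
--     """Split history string into individual action tokens."""
--     if not history or history == "root":
--         return []
--     tokens = []
--     i = 0
--     while i < len(history):
--         if history[i] in ('x', 'f', 'c', '|'):
--             tokens.append(history[i])
--             i += 1
--         elif history[i] in ('b', 'r'):
--             j = i + 1
--             while j < len(history) and (history[j].isdigit() or history[j] == '.'):
--                 j += 1
--             tokens.append(history[i:j])
--             i = j
--         else:
--             i += 1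
--     return tokens
-- ===== SOURCE B (Python) =====
-- import re
--
-- _TOKEN_RE = re.compile(r'[xfc|]|[br][0-9.]*')
--
-- def _split_history(history: str) -> list[str]:
--     """Split history string into individual action tokens."""
--     if not history or history == "root":
--         return []
--     return _TOKEN_RE.findall(history)
-- ===== Notes on version B (the rewrite author's own statement) =====
-- stated objective: idiomatic
-- what changed: The hand-written index-based scanner (outer while with manual i/j bookkeeping and slicing) is replaced by a single precompiled re.findall(r'[xfc|]|[br][0-9.]*') call whose C-level left-to-right non-overlapping matching does the same tokenization.
import Mathlib
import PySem

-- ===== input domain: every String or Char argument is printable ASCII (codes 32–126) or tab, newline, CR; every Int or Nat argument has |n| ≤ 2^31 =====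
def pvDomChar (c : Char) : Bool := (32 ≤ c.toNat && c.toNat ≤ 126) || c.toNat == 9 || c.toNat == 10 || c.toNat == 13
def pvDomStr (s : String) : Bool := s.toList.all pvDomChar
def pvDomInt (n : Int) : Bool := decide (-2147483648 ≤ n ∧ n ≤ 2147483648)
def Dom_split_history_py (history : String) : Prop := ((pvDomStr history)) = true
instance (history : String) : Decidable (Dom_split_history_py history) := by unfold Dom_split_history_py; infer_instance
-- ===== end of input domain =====

-- B replaces A's hand-written index scanner by one re.findall call (idiomatic); same tokens, same order.

-- shared one-character class tests (the tuple memberships / regex character classes)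
def pvIsTok (c : Char) : Bool := c == 'x' || c == 'f' || c == 'c' || c == '|'
def pvIsBet (c : Char) : Bool := c == 'b' || c == 'r'
def pvAmt (c : Char) : Bool := PySem.Chars.isdigit c || c == '.'

-- ===== PORT A =====
-- inner while: j = i+1; while j < len and (history[j].isdigit() or history[j]=='.'): j += 1
def pvScanJ (cs : List Char) (j : Nat) : Nat :=
  if h : j < cs.length then
    if pvAmt cs[j] then pvScanJ cs (j + 1) else j
  else j
termination_by cs.length - j

theorem pvScanJ_ge (cs : List Char) (j : Nat) : j ≤ pvScanJ cs j := by
  rw [pvScanJ]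
  split
  · split
    · exact le_trans (Nat.le_succ j) (pvScanJ_ge cs (j + 1))
    · exact le_refl j
  · exact le_refl j
termination_by cs.length - j

-- outer while loop of A, index i over the string's characters, tokens accumulated in order
def pvLoopA (cs : List Char) (i : Nat) (tokens : List String) : List String :=
  if h : i < cs.length then
    if pvIsTok cs[i] then pvLoopA cs (i + 1) (tokens ++ [String.ofList [cs[i]]])
    else if pvIsBet cs[i] then
      let j := pvScanJ cs (i + 1)
      pvLoopA cs j (tokens ++ [String.ofList (PySem.List.slice cs (some (i : Int)) (some (j : Int)))])
    else pvLoopA cs (i + 1) tokens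
  else tokens
termination_by cs.length - i
decreasing_by
  · omega
  · have := pvScanJ_ge cs (i + 1); omega
  · omega

def split_history_py (history : String) : List String :=
  if history = "" ∨ history = "root" then [] else pvLoopA history.toList 0 []

-- ===== PORT B =====
-- hand port of re.findall(r'[xfc|]|[br][0-9.]*', history): exact for this pattern — the regex
-- engine scans left to right, at each position emitting a single x/f/c/| match, or b/r followed
-- by the greedy run of [0-9.], or advancing one character on no match.
def pvTokB (cs : List Char) : List String :=
  match cs with
  | [] => []
  | c :: rest =>
    if pvIsTok c then String.ofList [c] :: pvTokB rest
    else if pvIsBet c then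
      let run := rest.takeWhile pvAmt
      String.ofList (c :: run) :: pvTokB (rest.drop run.length)
    else pvTokB rest
termination_by cs.length
decreasing_by
  · simp
  · simp only [List.length_cons, List.length_drop]; omega
  · simp

def split_history_py_alt (history : String) : List String :=
  if history = "" ∨ history = "root" then [] else pvTokB history.toList

-- ===== PRECONDITION & SPEC =====
def Spec_split_history_py (history : String) (out : List String) : Prop := out = split_history_py_alt history
instance (history : String) (out : List String) : Decidable (Spec_split_history_py history out) := by unfold Spec_split_history_py; infer_instance

-- ===== CLAIM (what is proved, stated in full; the proofs are below) =====
def Claim_equal_split_history_py : Prop := ∀ (history : String), Dom_split_history_py history → Spec_split_history_py history (split_history_py history)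

-- ===== LEMMAS AND PROOFS =====

theorem pv_takeWhile_take (p : Char → Bool) (l : List Char) :
    l.take (l.takeWhile p).length = l.takeWhile p := by
  induction l with
  | nil => rfl
  | cons c rest ih =>
    by_cases h : p c
    · simp [h, ih]
    · simp [h]

theorem pvScanJ_eq (cs : List Char) (j : Nat) :
    pvScanJ cs j = j + ((cs.drop j).takeWhile pvAmt).length := by
  rw [pvScanJ]
  split
  · rename_i h
    rw [List.drop_eq_getElem_cons h]
    split
    · rename_i hp
      rw [pvScanJ_eq cs (j + 1), List.takeWhile_cons, hp]
      simp; omega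
    · rename_i hp
      rw [List.takeWhile_cons]
      simp [hp]
  · rename_i h
    rw [List.drop_eq_nil_of_le (by omega)]
    simp
termination_by cs.length - j

theorem pvLoopA_eq (cs : List Char) (i : Nat) (tokens : List String) :
    pvLoopA cs i tokens = tokens ++ pvTokB (cs.drop i) := by
  rw [pvLoopA]
  split
  · rename_i h
    have hdrop : cs.drop i = cs[i] :: cs.drop (i + 1) := List.drop_eq_getElem_cons h
    split
    · rename_i ht
      rw [pvLoopA_eq cs (i + 1), hdrop, pvTokB, ht]
      simp
    · rename_i ht
      split
      · rename_i hb
        have hj : pvScanJ cs (i + 1) = i + 1 + ((cs.drop (i + 1)).takeWhile pvAmt).length :=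
          pvScanJ_eq cs (i + 1)
        rw [pvLoopA_eq cs (pvScanJ cs (i + 1))]
        rw [hdrop, pvTokB]
        simp only [ht, hb, Bool.false_eq_true, if_false, if_pos]
        have hslice : PySem.List.slice cs (some (i : Int)) (some ((pvScanJ cs (i + 1)) : Int))
            = cs[i] :: (cs.drop (i + 1)).takeWhile pvAmt := by
          rw [PySem.List.slice_natCast, hj]
          have : i + 1 + ((cs.drop (i + 1)).takeWhile pvAmt).length - i
              = ((cs.drop (i + 1)).takeWhile pvAmt).length + 1 := by omega
          rw [this, hdrop, List.take_succ_cons, pv_takeWhile_take]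
        have hdropj : cs.drop (pvScanJ cs (i + 1))
            = (cs.drop (i + 1)).drop ((cs.drop (i + 1)).takeWhile pvAmt).length := by
          rw [hj, List.drop_drop]
        rw [hslice, hdropj]
        simp
      · rename_i hb
        rw [pvLoopA_eq cs (i + 1), hdrop, pvTokB]
        simp [ht, hb]
  · rename_i h
    rw [List.drop_eq_nil_of_le (by omega), pvTokB]
    simp
termination_by cs.length - i
decreasing_by
  · omega
  · have := pvScanJ_ge cs (i + 1); omega
  · omega

-- ===== VERDICT (by name: the statement is the Claim_ definition above) =====
theorem split_history_py_spec : Claim_equal_split_history_py := by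
  intro history _
  unfold Spec_split_history_py split_history_py split_history_py_alt
  split
  · rfl
  · rw [pvLoopA_eq]
    simp
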